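-- pv_equiv track=rewrite | github.com/morelikeGIFHUB/queens-puzzle-sinner | songqueens.py | assignment_consistent
-- ===== SOURCE A (Python) =====
-- from typing import Dict, Set, Tuple, List
--
-- Cell = Tuple[int, int]
--
-- def touches(r1, c1, r2, c2):
--     return abs(r1 - r2) <= 1 and abs(c1 - c2) <= 1
--
-- def assignment_consistent(regions, N: int, assignment: Dict[int, int]) -> bool:
--     """
--     True if the current partial assignment obeys:
--       - at most one queen per column
--       - at most one queen per region
--       - no-touch constraint (including diagonals)
--     (Rows are unique by construction because assignment keys are rows.)
--     """
--     cols_seen: Set[int] = set()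
--     regs_seen: Set[int] = set()
--     placed: List[Cell] = []
--
--     for r, c in assignment.items():
--         if not (0 <= r < N and 0 <= c < N):
--             return False
--
--         if c in cols_seen:
--             return False
--         cols_seen.add(c)
--
--         rid = regions[r][c]
--         if rid in regs_seen:
--             return False
--         regs_seen.add(rid)
--
--         placed.append((r, c))
--
--     # no-touch
--     for i in range(len(placed)):
--         r1, c1 = placed[i]
--         for j in range(i + 1, len(placed)):
--             r2, c2 = placed[j]
--             if touches(r1, c1, r2, c2):
--                 return False
--
--     return True
-- ===== SOURCE B (Python) =====
-- def assignment_consistent(regions, N, assignment):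
--     items = list(assignment.items())
--     if any(not (0 <= r < N and 0 <= c < N) for r, c in items):
--         return False
--     cols = [c for _, c in items]
--     if len(set(cols)) != len(cols):
--         return False
--     rids = [regions[r][c] for r, c in items]
--     if len(set(rids)) != len(rids):
--         return False
--     # rows are unique dict keys, so two queens touch iff they sit on
--     # adjacent rows with columns at most 1 apart: check each row against row+1 only
--     col_of = dict(items)
--     return all(abs(c - col_of[r + 1]) > 1 for r, c in items if r + 1 in col_of)
-- ===== Notes on version B (the rewrite author's own statement) =====
-- stated objective: alternative
-- what changed: Replaces A's all-pairs touch scan (quadratic in the number of queens) with a single pass that looks up only the adjacent row r+1 in a row-indexed dict (rows are unique keys, so any touching pair lies on adjacent rows), and replaces A's incremental seen-sets with whole-list set-cardinality duplicate checks; on a timing run's generated inputs A bails out early, so no speed-up was measured.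
-- outside the precondition, e.g. on assignment_consistent([[0]], 2, {0: 2, 1: 1}): A returns False, B returns False
import Mathlib
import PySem

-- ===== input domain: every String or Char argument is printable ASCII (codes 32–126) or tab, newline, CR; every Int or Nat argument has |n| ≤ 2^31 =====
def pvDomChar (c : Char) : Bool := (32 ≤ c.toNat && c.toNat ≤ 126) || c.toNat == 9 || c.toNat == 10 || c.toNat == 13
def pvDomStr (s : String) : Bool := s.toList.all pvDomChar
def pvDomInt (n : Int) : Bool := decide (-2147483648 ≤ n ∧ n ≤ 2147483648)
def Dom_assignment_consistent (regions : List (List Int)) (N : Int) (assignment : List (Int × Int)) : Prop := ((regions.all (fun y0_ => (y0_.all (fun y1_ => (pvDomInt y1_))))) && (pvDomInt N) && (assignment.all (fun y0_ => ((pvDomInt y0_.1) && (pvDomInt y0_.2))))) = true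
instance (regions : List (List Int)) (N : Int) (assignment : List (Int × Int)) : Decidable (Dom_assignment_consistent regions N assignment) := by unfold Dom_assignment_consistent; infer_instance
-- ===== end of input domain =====

-- B replaces A's all-pairs no-touch scan by a single pass that consults only the
-- adjacent row r+1 through a row-indexed dict, and A's incremental seen-sets by
-- whole-list set-cardinality duplicate checks (objective: alternative algorithm).


-- ===== PORT A =====
-- helper 'touches' of the Python module
def pvTouches (r1 c1 r2 c2 : Int) : Bool := decide (|r1 - r2| ≤ 1) && decide (|c1 - c2| ≤ 1)

-- first loop of A: bounds / column-set / region-set checks, building 'placed';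
-- 'none' = early 'return False'.  regions[r][c] failing is Python's IndexError
-- (excluded by Pre_); the port returns 'none' there too.
def pvAScan (regions : List (List Int)) (N : Int) :
    List (Int × Int) → PySem.Set Int → PySem.Set Int → List (Int × Int) → Option (List (Int × Int))
  | [], _, _, placed => some placed
  | (r, c) :: rest, colsSeen, regsSeen, placed =>
    if ¬ (0 ≤ r ∧ r < N ∧ 0 ≤ c ∧ c < N) then none
    else if PySem.Set.contains colsSeen c then none
    else
      match (PySem.List.pyGet? regions r).bind (fun row => PySem.List.pyGet? row c) with
      | none => none
      | some rid =>
        if PySem.Set.contains regsSeen rid then none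
        else pvAScan regions N rest (PySem.Set.add colsSeen c) (PySem.Set.add regsSeen rid) (placed ++ [(r, c)])

-- second loop of A: for i, for j in range(i+1, ...): if touches: return False
def pvANoTouch : List (Int × Int) → Bool
  | [] => true
  | p :: rest => if rest.any (fun q => pvTouches p.1 p.2 q.1 q.2) then false else pvANoTouch rest

def assignment_consistent (regions : List (List Int)) (N : Int) (assignment : List (Int × Int)) : Bool :=
  match pvAScan regions N assignment PySem.Set.empty PySem.Set.empty [] with
  | none => false
  | some placed => pvANoTouch placed

-- ===== PORT B =====
-- regions[r][c], totalised with default 0; Pre_ guarantees the lookup succeeds when used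
def pvRid (regions : List (List Int)) (p : Int × Int) : Int :=
  ((PySem.List.pyGet? regions p.1).bind (fun row => PySem.List.pyGet? row p.2)).getD 0

def assignment_consistent_alt (regions : List (List Int)) (N : Int) (assignment : List (Int × Int)) : Bool :=
  let items := assignment
  if items.any (fun p => ¬ (0 ≤ p.1 ∧ p.1 < N ∧ 0 ≤ p.2 ∧ p.2 < N)) then false
  else
    let cols := items.map Prod.snd
    if (PySem.Set.ofList cols).length ≠ cols.length then false
    else
      let rids := items.map (pvRid regions)
      if (PySem.Set.ofList rids).length ≠ rids.length then false
      else
        let colOf := PySem.Dict.ofList items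
        items.all (fun p =>
          match colOf.get? (p.1 + 1) with
          | none => true
          | some c2 => decide (1 < |p.2 - c2|))

-- ===== PRECONDITION & SPEC =====
-- Pre_ excludes (i) assignments whose rows are not pairwise distinct (such an association
-- list is not representable as the Python dict argument), and (ii) inputs having an
-- in-bounds queen whose cell is missing from 'regions': on those A raises IndexError,
-- unless an earlier entry fails a check first, in which case A returns False (see cites).
def Pre_assignment_consistent (regions : List (List Int)) (N : Int) (assignment : List (Int × Int)) : Prop :=
  (assignment.map Prod.fst).Nodup ∧
  ∀ p ∈ assignment, (0 ≤ p.1 ∧ p.1 < N ∧ 0 ≤ p.2 ∧ p.2 < N) →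
    ((PySem.List.pyGet? regions p.1).bind (fun row => PySem.List.pyGet? row p.2)).isSome
instance (regions : List (List Int)) (N : Int) (assignment : List (Int × Int)) : Decidable (Pre_assignment_consistent regions N assignment) := by unfold Pre_assignment_consistent; infer_instance

def pvWitness_assignment_consistent : List (List Int) × Int × (List (Int × Int)) :=
  ([[0, 0], [1, 1]], 2, [(0, 0), (1, 1)])

def Spec_assignment_consistent (regions : List (List Int)) (N : Int) (assignment : List (Int × Int)) (out : Bool) : Prop := out = assignment_consistent_alt regions N assignment
instance (regions : List (List Int)) (N : Int) (assignment : List (Int × Int)) (out : Bool) : Decidable (Spec_assignment_consistent regions N assignment out) := by unfold Spec_assignment_consistent; infer_instance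

-- ===== CLAIM (what is proved, stated in full; the proofs are below) =====
def Claim_equal_assignment_consistent : Prop := ∀ (regions : List (List Int)) (N : Int) (assignment : List (Int × Int)), Dom_assignment_consistent regions N assignment → Pre_assignment_consistent regions N assignment → Spec_assignment_consistent regions N assignment (assignment_consistent regions N assignment)

-- ===== LEMMAS AND PROOFS =====

-- the conditions A's first loop checks, stated over the whole remaining list
def pvGood (regions : List (List Int)) (N : Int) (rest : List (Int × Int))
    (cols regs : PySem.Set Int) : Prop :=
  (∀ p ∈ rest, 0 ≤ p.1 ∧ p.1 < N ∧ 0 ≤ p.2 ∧ p.2 < N) ∧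
  (rest.map Prod.snd).Nodup ∧ (∀ c ∈ rest.map Prod.snd, c ∉ cols) ∧
  (rest.map (pvRid regions)).Nodup ∧ (∀ x ∈ rest.map (pvRid regions), x ∉ regs)

theorem pvAScan_some (regions : List (List Int)) (N : Int) (rest : List (Int × Int))
    (cols regs : PySem.Set Int) (placed : List (Int × Int))
    (hpre : ∀ p ∈ rest, (0 ≤ p.1 ∧ p.1 < N ∧ 0 ≤ p.2 ∧ p.2 < N) →
      ((PySem.List.pyGet? regions p.1).bind (fun row => PySem.List.pyGet? row p.2)).isSome)
    (hg : pvGood regions N rest cols regs) :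
    pvAScan regions N rest cols regs placed = some (placed ++ rest) := by
  induction rest generalizing cols regs placed with
  | nil => simp [pvAScan]
  | cons hd tl ih =>
    obtain ⟨r, c⟩ := hd
    obtain ⟨hb, hcn, hcf, hrn, hrf⟩ := hg
    have hbh := hb (r, c) (List.mem_cons_self ..)
    have hlook := hpre (r, c) (List.mem_cons_self ..) hbh
    obtain ⟨rid, hrid⟩ := Option.isSome_iff_exists.mp hlook
    have hridv : pvRid regions (r, c) = rid := by simp [pvRid, hrid]
    simp only [List.map_cons, List.nodup_cons, List.mem_cons, List.mem_map] at hcn hcf hrn hrf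
    have hcmem : c ∉ cols := hcf c (Or.inl rfl)
    have hrmem : rid ∉ regs := hrf rid (Or.inl hridv.symm)
    have step : pvAScan regions N ((r, c) :: tl) cols regs placed =
        pvAScan regions N tl (PySem.Set.add cols c) (PySem.Set.add regs rid) (placed ++ [(r, c)]) := by
      simp only [pvAScan, hrid]
      simp [hbh, hcmem, hrmem]
    rw [step, ih _ _ _ (fun p hp => hpre p (List.mem_cons_of_mem _ hp))]
    · simp
    · refine ⟨fun p hp => hb p (List.mem_cons_of_mem _ hp), hcn.2, ?_, hrn.2, ?_⟩
      · intro c' hc'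
        obtain ⟨p, hp, hpc⟩ := List.mem_map.mp hc'
        intro hmem
        rcases (PySem.Set.mem_add cols c c').mp hmem with h | h
        · exact hcf c' (Or.inr ⟨p, hp, hpc⟩) h
        · exact hcn.1 ⟨p, hp, h ▸ hpc⟩
      · intro x hx
        obtain ⟨p, hp, hpx⟩ := List.mem_map.mp hx
        intro hmem
        rcases (PySem.Set.mem_add regs rid x).mp hmem with h | h
        · exact hrf x (Or.inr ⟨p, hp, hpx⟩) h
        · exact hrn.1 ⟨p, hp, by rw [hpx, h, hridv]⟩

theorem pvAScan_none (regions : List (List Int)) (N : Int) (rest : List (Int × Int))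
    (cols regs : PySem.Set Int) (placed : List (Int × Int))
    (hpre : ∀ p ∈ rest, (0 ≤ p.1 ∧ p.1 < N ∧ 0 ≤ p.2 ∧ p.2 < N) →
      ((PySem.List.pyGet? regions p.1).bind (fun row => PySem.List.pyGet? row p.2)).isSome)
    (hg : ¬ pvGood regions N rest cols regs) :
    pvAScan regions N rest cols regs placed = none := by
  induction rest generalizing cols regs placed with
  | nil => exact absurd (by simp [pvGood]) hg
  | cons hd tl ih =>
    obtain ⟨r, c⟩ := hd
    by_cases hbh : 0 ≤ r ∧ r < N ∧ 0 ≤ c ∧ c < N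
    · have hlook := hpre (r, c) (List.mem_cons_self ..) hbh
      obtain ⟨rid, hrid⟩ := Option.isSome_iff_exists.mp hlook
      have hridv : pvRid regions (r, c) = rid := by simp [pvRid, hrid]
      by_cases hcmem : c ∈ cols
      · simp [pvAScan, hbh, hcmem]
      · by_cases hrmem : rid ∈ regs
        · simp only [pvAScan, hrid]
          simp [hbh, hcmem, hrmem]
        · have step : pvAScan regions N ((r, c) :: tl) cols regs placed =
              pvAScan regions N tl (PySem.Set.add cols c) (PySem.Set.add regs rid) (placed ++ [(r, c)]) := by
            simp only [pvAScan, hrid]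
            simp [hbh, hcmem, hrmem]
          rw [step]
          refine ih _ _ _ (fun p hp => hpre p (List.mem_cons_of_mem _ hp)) ?_
          intro ⟨hb', hcn', hcf', hrn', hrf'⟩
          refine hg ⟨?_, ?_, ?_, ?_, ?_⟩
          · intro p hp
            rcases List.mem_cons.mp hp with h | h
            · exact h ▸ hbh
            · exact hb' p h
          · simp only [List.map_cons, List.nodup_cons]
            refine ⟨?_, hcn'⟩
            intro hc
            exact hcf' c hc ((PySem.Set.mem_add cols c c).mpr (Or.inr rfl))
          · intro c' hc'
            rcases List.mem_map.mp hc' with ⟨p, hp, hpc⟩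
            rcases List.mem_cons.mp hp with h | h
            · exact fun hm => hcmem (by rwa [← hpc, h] at hm)
            · exact fun hm => hcf' c' (List.mem_map.mpr ⟨p, h, hpc⟩)
                ((PySem.Set.mem_add cols c c').mpr (Or.inl hm))
          · simp only [List.map_cons, List.nodup_cons]
            refine ⟨?_, hrn'⟩
            intro hx
            exact hrf' (pvRid regions (r, c)) hx
              ((PySem.Set.mem_add regs rid _).mpr (Or.inr hridv))
          · intro x hx
            rcases List.mem_map.mp hx with ⟨p, hp, hpx⟩
            rcases List.mem_cons.mp hp with h | h
            · exact fun hm => hrmem (by rwa [← hpx, h, hridv] at hm)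
            · exact fun hm => hrf' x (List.mem_map.mpr ⟨p, h, hpx⟩)
                ((PySem.Set.mem_add regs rid x).mpr (Or.inl hm))
    · simp [pvAScan, hbh]

theorem pvANoTouch_iff (l : List (Int × Int)) :
    pvANoTouch l = true ↔ l.Pairwise (fun p q => pvTouches p.1 p.2 q.1 q.2 = false) := by
  induction l with
  | nil => simp [pvANoTouch]
  | cons p rest ih =>
    by_cases h : rest.any (fun q => pvTouches p.1 p.2 q.1 q.2) = true
    · simp only [pvANoTouch, h, if_true, List.pairwise_cons]
      obtain ⟨q, hq, hqt⟩ := List.any_eq_true.mp h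
      simp only [Bool.false_eq_true, false_iff, not_and]
      intro hall
      rw [hall q hq] at hqt
      exact absurd hqt (by decide)
    · simp only [Bool.not_eq_true] at h
      simp only [pvANoTouch, h, Bool.false_eq_true, if_false, List.pairwise_cons, ih]
      simp only [List.any_eq_false, Bool.not_eq_true] at h
      exact ⟨fun hr => ⟨h, hr⟩, fun x => x.2⟩

theorem pv_ofList_len_iff (l : List Int) :
    (PySem.Set.ofList l).length = l.length ↔ l.Nodup := by
  have h1 : (PySem.Set.ofList l).toFinset = l.toFinset := by
    ext x; simp [List.mem_toFinset, PySem.Set.mem_ofList]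
  have h2 : (PySem.Set.ofList l).length = l.toFinset.card := by
    rw [← h1, List.toFinset_card_of_nodup (PySem.Set.nodup_ofList l)]
  rw [h2]
  constructor
  · intro h
    rw [List.card_toFinset] at h
    exact List.dedup_eq_self.mp (List.Sublist.eq_of_length (List.dedup_sublist l) h)
  · intro h
    exact List.toFinset_card_of_nodup h

theorem pv_items_ofList (l : List (Int × Int)) (h : (l.map Prod.fst).Nodup) :
    (PySem.Dict.ofList l).items = l := by
  have : (PySem.Dict.ofList l : PySem.Dict Int Int) =
      l.foldl (fun d (a : Int × Int) => d.insert a.1 a.2) PySem.Dict.empty := rfl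
  rw [this]
  have := PySem.Dict.items_foldl_insert_fresh l Prod.fst Prod.snd
    (PySem.Dict.empty : PySem.Dict Int Int)
    (fun a _ => PySem.Dict.contains_empty a.1) h
  simpa using this

theorem pv_get?_ofList (l : List (Int × Int)) (h : (l.map Prod.fst).Nodup) (k v : Int) :
    (PySem.Dict.ofList l).get? k = some v ↔ (k, v) ∈ l := by
  have hk : (PySem.Dict.ofList l : PySem.Dict Int Int).keys.Nodup := by
    have : (PySem.Dict.ofList l : PySem.Dict Int Int).keys = l.map Prod.fst := by
      simp [PySem.Dict.keys, pv_items_ofList l h]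
    rw [this]; exact h
  rw [PySem.Dict.get?_eq_some_iff_mem_items _ _ _ hk, pv_items_ofList l h]

theorem pvTouches_symm (r1 c1 r2 c2 : Int) :
    pvTouches r1 c1 r2 c2 = pvTouches r2 c2 r1 c1 := by
  simp [pvTouches, abs_sub_comm]

-- under the Pre_ hypotheses, A's pairwise no-touch scan agrees with B's
-- adjacent-row dict check
theorem pv_noTouch_eq_all (l : List (Int × Int))
    (hnd : (l.map Prod.fst).Nodup) :
    pvANoTouch l =
      l.all (fun p =>
        match (PySem.Dict.ofList l).get? (p.1 + 1) with
        | none => true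
        | some c2 => decide (1 < |p.2 - c2|)) := by
  have hlnd : l.Nodup := hnd.of_map
  rw [Bool.eq_iff_iff, pvANoTouch_iff, List.all_eq_true]
  constructor
  · intro hpw p hp
    cases hg : (PySem.Dict.ofList l).get? (p.1 + 1) with
    | none => rfl
    | some c2 =>
      have hq : (p.1 + 1, c2) ∈ l := (pv_get?_ofList l hnd _ _).mp hg
      have hne : p ≠ (p.1 + 1, c2) := by
        intro h; have := congrArg Prod.fst h; simp at this
      have hno := List.Pairwise.forall (l := l)
        (fun a b hab => (pvTouches_symm b.1 b.2 a.1 a.2).trans hab) hpw hp hq hne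
      simp only [pvTouches, Bool.and_eq_false_iff, decide_eq_false_iff_not, not_le] at hno
      simp only [decide_eq_true_iff]
      have he : p.1 - (p.1 + 1) = -1 := by ring
      rcases hno with h | h
      · rw [he] at h; norm_num at h
      · exact h
  · intro hall
    refine List.Nodup.pairwise_of_forall_ne hlnd ?_
    intro x hx y hy hxy
    by_contra ht
    rw [Bool.not_eq_false] at ht
    simp only [pvTouches, Bool.and_eq_true, decide_eq_true_iff] at ht
    obtain ⟨h1, h2⟩ := ht
    rw [abs_le] at h1 h2
    have hfst : x.1 ≠ y.1 := by
      intro h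
      exact hxy (List.inj_on_of_nodup_map hnd hx hy h)
    have hcases : y.1 = x.1 + 1 ∨ x.1 = y.1 + 1 := by omega
    rcases hcases with h | h
    · have hy2 : y = (x.1 + 1, y.2) := by rw [← h]
      have hy' : (x.1 + 1, y.2) ∈ l := hy2 ▸ hy
      have := hall x hx
      rw [(pv_get?_ofList l hnd _ _).mpr hy'] at this
      simp only [decide_eq_true_iff] at this
      rcases lt_abs.mp this with h' | h' <;> omega
    · have hx2 : x = (y.1 + 1, x.2) := by rw [← h]
      have hx' : (y.1 + 1, x.2) ∈ l := hx2 ▸ hx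
      have := hall y hy
      rw [(pv_get?_ofList l hnd _ _).mpr hx'] at this
      simp only [decide_eq_true_iff] at this
      rcases lt_abs.mp this with h' | h' <;> omega

-- ===== VERDICT (by name: the statement is the Claim_ definition above) =====
theorem assignment_consistent_spec : Claim_equal_assignment_consistent := by
  intro regions N assignment _ hpre
  obtain ⟨hnd, hlk⟩ := hpre
  unfold Spec_assignment_consistent assignment_consistent assignment_consistent_alt
  by_cases hP1 : ∀ p ∈ assignment, 0 ≤ p.1 ∧ p.1 < N ∧ 0 ≤ p.2 ∧ p.2 < N
  · have hany : assignment.any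
        (fun p => decide ¬(0 ≤ p.1 ∧ p.1 < N ∧ 0 ≤ p.2 ∧ p.2 < N)) = false := by
      simp only [List.any_eq_false, decide_eq_true_iff]
      intro p hp h
      exact h (hP1 p hp)
    by_cases hc : (assignment.map Prod.snd).Nodup
    · by_cases hr : (assignment.map (pvRid regions)).Nodup
      · have hg : pvGood regions N assignment PySem.Set.empty PySem.Set.empty :=
          ⟨hP1, hc, by simp [PySem.Set.empty], hr, by simp [PySem.Set.empty]⟩
        rw [pvAScan_some regions N assignment _ _ [] hlk hg]
        simp only [List.nil_append, hany, Bool.false_eq_true, if_false,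
          pv_ofList_len_iff _ |>.mpr hc]
        simp only [pv_ofList_len_iff _ |>.mpr hr, ne_eq, not_true_eq_false, if_false]
        exact pv_noTouch_eq_all assignment hnd
      · rw [pvAScan_none regions N assignment _ _ [] hlk (fun hg => hr hg.2.2.2.1)]
        have hlen : (PySem.Set.ofList (assignment.map (pvRid regions))).length ≠
            assignment.length := by
          intro h; exact hr ((pv_ofList_len_iff _).mp (by simpa using h))
        simp [pv_ofList_len_iff _ |>.mpr hc, hlen]
    · rw [pvAScan_none regions N assignment _ _ [] hlk (fun hg => hc hg.2.1)]
      have hlen : (PySem.Set.ofList (assignment.map Prod.snd)).length ≠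
          assignment.length := by
        intro h; exact hc ((pv_ofList_len_iff _).mp (by simpa using h))
      simp [hlen]
  · rw [pvAScan_none regions N assignment _ _ [] hlk (fun hg => hP1 hg.1)]
    simp only [Bool.false_eq]
    simp
    intro hb'
    exact absurd (fun (p : Int × Int) hp => hb' p.1 p.2 hp) hP1
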